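-- pv_equiv track=rewrite | github.com/amahfouz/python-prog-challenge | hackr/bfs-shortest-reach.py | bfs
-- ===== SOURCE A (Python) =====
-- from collections import deque
--
-- def bfs(n, m, edges, s):
--
--     # adjacency list
--     adjacency = [ [] for _ in range(n+1)]
--
--     # computed reach
--     reach = [-1 for _ in range(n+1)]
--     reach[s] = 0
--
--     # undirected graph - add edge both ways
--     for e in edges:
--         adjacency[e[0]].append(e[1])
--         adjacency[e[1]].append(e[0])
--
--     queue = deque()
--     queue.appendleft(s)
--
--     while len(queue) > 0:
--         parent = queue.pop()
--
--         # add all unvisited neighbors to next level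
--         for neighbor in adjacency[parent]:
--             if reach[neighbor] < 0:
--                reach[neighbor] = reach[parent] + 1
--                queue.appendleft(neighbor)
--
--     # remove the source from the result as per problem def
--     reach.pop(s)
--     # there is no node #0 so pop unused element
--     reach.pop(0)
--     return [x * 6 if x > 0 else x for x in reach]
-- ===== SOURCE B (Python) =====
-- def bfs(n, m, edges, s):
--     # Level-by-level edge relaxation (Bellman-Ford style): no adjacency list
--     # and no queue; each round scans the raw edge list and relaxes every edge
--     # incident to a node at the current level, until a round changes nothing.
--     reach = [-1 for _ in range(n + 1)]
--     reach[s] = 0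
--     for d in range(n + 1):
--         changed = False
--         for e in edges:
--             a, b = e[0], e[1]
--             if reach[a] == d and reach[b] < 0:
--                 reach[b] = d + 1
--                 changed = True
--             if reach[b] == d and reach[a] < 0:
--                 reach[a] = d + 1
--                 changed = True
--         if not changed:
--             break
--     reach.pop(s)
--     reach.pop(0)
--     return [x * 6 if x > 0 else x for x in reach]
-- ===== Notes on version B (the rewrite author's own statement) =====
-- stated objective: alternative
-- what changed: Replaces A's adjacency-list + deque BFS by queue-free level-by-level edge relaxation (Bellman-Ford restricted to unit weights): no adjacency list is built at all; round d scans the raw edge list and assigns d+1 across every edge touching a node labelled d, stopping when a round changes nothing.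
import Mathlib
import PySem

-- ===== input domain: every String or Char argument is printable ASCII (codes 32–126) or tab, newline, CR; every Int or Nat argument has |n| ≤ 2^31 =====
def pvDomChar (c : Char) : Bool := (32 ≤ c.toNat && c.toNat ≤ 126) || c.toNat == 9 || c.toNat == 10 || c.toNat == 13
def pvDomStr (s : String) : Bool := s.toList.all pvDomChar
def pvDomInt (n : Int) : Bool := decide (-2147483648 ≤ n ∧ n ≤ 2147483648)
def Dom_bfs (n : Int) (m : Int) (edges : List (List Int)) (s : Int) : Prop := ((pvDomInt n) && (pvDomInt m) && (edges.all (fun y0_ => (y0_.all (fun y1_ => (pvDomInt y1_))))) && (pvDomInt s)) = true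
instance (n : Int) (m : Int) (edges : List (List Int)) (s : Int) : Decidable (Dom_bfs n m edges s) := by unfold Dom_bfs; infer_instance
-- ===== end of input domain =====

-- B replaces A's adjacency-list + deque BFS by queue-free level-by-level edge
-- relaxation (unit-weight Bellman-Ford: each round scans the raw edge list);
-- the equivalence proved is exact on Pre_ (exactly the inputs where A returns).


-- ===== PORT A =====
-- Helpers shared by BOTH ports: both Pythons contain these identical lines
-- (reach initialisation, and the final pop(s); pop(0); x*6 mapping).

-- reach = [-1 for _ in range(n+1)]; reach[s] = 0
def pvInitReach (n : Int) (s : Int) : List Int :=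
  PySem.List.pySetD ((PySem.List.pyRange 0 (n+1) 1).map (fun _ => (-1 : Int))) s 0

-- reach.pop(s); reach.pop(0); return [x*6 if x > 0 else x for x in reach]
-- (the `none` branches are where Python raises IndexError — excluded by Pre_)
def pvPost (s : Int) (reach : List Int) : List Int :=
  match PySem.List.pop? reach s with
  | none => []
  | some (_, r1) =>
    match PySem.List.pop? r1 0 with
    | none => []
    | some (_, r2) => r2.map (fun x => if x > 0 then x * 6 else x)

-- A only: adjacency = [[] for _ in range(n+1)];
-- for e in edges: adjacency[e[0]].append(e[1]); adjacency[e[1]].append(e[0])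
def pvAdjStep (adj : List (List Int)) (e : List Int) : List (List Int) :=
  let a := PySem.List.pyGetD e 0 0
  let b := PySem.List.pyGetD e 1 0
  let adj := PySem.List.pySetD adj a (PySem.List.pyGetD adj a [] ++ [b])
  PySem.List.pySetD adj b (PySem.List.pyGetD adj b [] ++ [a])

def pvInitAdj (n : Int) (edges : List (List Int)) : List (List Int) :=
  edges.foldl pvAdjStep ((PySem.List.pyRange 0 (n+1) 1).map (fun _ => ([] : List Int)))

-- fuel for A's while loop: a totality guard only; under Pre_ it is never
-- exhausted (the loop runs at most n+2 iterations).
def pvFuel (n : Int) : Nat := (2*(n+1)).toNat + 2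

-- A's while loop over the deque, the queue listed in pop order
-- (head = next pop(); appendleft = append at the tail):
def pvLoopA : Nat → List (List Int) → List Int → List Int → List Int
  | 0, _, reach, _ => reach
  | _+1, _, reach, [] => reach
  | fuel+1, adj, reach, p :: rest =>
    let st := (PySem.List.pyGetD adj p []).foldl (fun (st : List Int × List Int) nb =>
        if PySem.List.pyGetD st.1 nb 0 < 0 then
          (PySem.List.pySetD st.1 nb (PySem.List.pyGetD st.1 p (-1) + 1), st.2 ++ [nb])
        else st) (reach, rest)
    pvLoopA fuel adj st.1 st.2

def bfs (n : Int) (m : Int) (edges : List (List Int)) (s : Int) : List Int :=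
  pvPost s (pvLoopA (pvFuel n) (pvInitAdj n edges) (pvInitReach n s) [s])

-- ===== PORT B =====
-- one edge of B's inner loop: relax e in both directions, tracking `changed`
def pvEdgeStep (d : Int) (st : List Int × Bool) (e : List Int) : List Int × Bool :=
  let a := PySem.List.pyGetD e 0 0
  let b := PySem.List.pyGetD e 1 0
  let st :=
    if PySem.List.pyGetD st.1 a 0 = d ∧ PySem.List.pyGetD st.1 b 0 < 0 then
      (PySem.List.pySetD st.1 b (d+1), true) else st
  if PySem.List.pyGetD st.1 b 0 = d ∧ PySem.List.pyGetD st.1 a 0 < 0 then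
    (PySem.List.pySetD st.1 a (d+1), true) else st

-- for d in range(n+1): changed = False; <scan edges>; if not changed: break
def pvRounds (edges : List (List Int)) : List Int → List Int → List Int
  | [], reach => reach
  | d :: ds, reach =>
    let st := edges.foldl (pvEdgeStep d) (reach, false)
    if st.2 then pvRounds edges ds st.1 else st.1

def bfs_alt (n : Int) (m : Int) (edges : List (List Int)) (s : Int) : List Int :=
  pvPost s (pvRounds edges (PySem.List.pyRange 0 (n+1) 1) (pvInitReach n s))

-- ===== PRECONDITION & SPEC =====
-- Pre_ is exactly where the Python A returns normally: A raises IndexError when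
-- n < 1 (the second reach.pop on an emptied list), when s is not a valid index
-- of the (n+1)-element lists (negative indices down to -(n+1) are valid Python
-- indices), or when some edge has fewer than two entries or an endpoint that is
-- not a valid index of the (n+1)-element lists.
def Pre_bfs (n : Int) (m : Int) (edges : List (List Int)) (s : Int) : Prop :=
  1 ≤ n ∧ (-(n+1) ≤ s ∧ s ≤ n) ∧
  ∀ e ∈ edges, 2 ≤ e.length ∧ ∀ x ∈ e.take 2, -(n+1) ≤ x ∧ x ≤ n
instance (n : Int) (m : Int) (edges : List (List Int)) (s : Int) : Decidable (Pre_bfs n m edges s) := by unfold Pre_bfs; infer_instance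

def pvWitness_bfs : Int × Int × List (List Int) × Int := (4, 2, [[1, 2], [2, 4]], 1)

def Spec_bfs (n : Int) (m : Int) (edges : List (List Int)) (s : Int) (out : List Int) : Prop := out = bfs_alt n m edges s
instance (n : Int) (m : Int) (edges : List (List Int)) (s : Int) (out : List Int) : Decidable (Spec_bfs n m edges s out) := by unfold Spec_bfs; infer_instance

-- ===== CLAIM (what is proved, stated in full; the proofs are below) =====
def Claim_equal_bfs : Prop := ∀ (n : Int) (m : Int) (edges : List (List Int)) (s : Int), Dom_bfs n m edges s → Pre_bfs n m edges s → Spec_bfs n m edges s (bfs n m edges s)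

-- ===== LEMMAS AND PROOFS =====

-- B's loop rephrased for the proof: the level-synchronous frontier loop that
-- sits between A's deque loop and B's edge-relaxation rounds.
def pvG (w : Int) (st : List Int × List Int) (v : Int) : List Int × List Int :=
  if PySem.List.pyGetD st.1 v 0 < 0 then (PySem.List.pySetD st.1 v w, st.2 ++ [v]) else st

def pvLoopB : Nat → List (List Int) → List Int → List Int → Int → List Int
  | 0, _, reach, _, _ => reach
  | _+1, _, reach, [], _ => reach
  | fuel+1, adj, reach, f :: fs, dist =>
    let st := (f :: fs).foldl (fun (st : List Int × List Int) u =>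
        (PySem.List.pyGetD adj u []).foldl (pvG (dist+1)) st) (reach, ([] : List Int))
    pvLoopB fuel adj st.1 st.2 (dist + 1)

-- A's inner loop body, named
def pvF (p : Int) (st : List Int × List Int) (nb : Int) : List Int × List Int :=
  if PySem.List.pyGetD st.1 nb 0 < 0 then
    (PySem.List.pySetD st.1 nb (PySem.List.pyGetD st.1 p (-1) + 1), st.2 ++ [nb])
  else st

-- number of still-unvisited slots: the termination measure of the loops
def pvNeg (r : List Int) : Nat := r.countP (fun x => decide (x < 0))

-- the Nat index a valid Python index i resolves to
def pvIdx (nn : Nat) (i : Int) : Nat := (PySem.List.pyIdx? nn i).getD nn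

-- A's loop entered in the middle of a layer (proof-side decomposition)
def pvRunB (adj : List (List Int)) : List Int → List Int → List Int → Int → Nat → List Int
  | reach, [], f2, d, fuel => pvLoopB fuel adj reach f2 (d+1)
  | reach, u :: f1, f2, d, fuel =>
    let st := (PySem.List.pyGetD adj u []).foldl (pvG (d+1)) (reach, f2)
    pvRunB adj st.1 f1 st.2 d fuel

theorem pvIdx_spec {nn : Nat} {i : Int} (h : PySem.Raise.InRange nn i) :
    PySem.List.pyIdx? nn i = some (pvIdx nn i) ∧ pvIdx nn i < nn := by
  obtain ⟨h1, h2⟩ := h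
  unfold pvIdx PySem.List.pyIdx?
  split_ifs with ha <;> simp_all <;> omega

theorem pyGetD_out {α : Type} {xs : List α} {i : Int} {d : α}
    (h : ¬ PySem.Raise.InRange xs.length i) : PySem.List.pyGetD xs i d = d := by
  unfold PySem.List.pyGetD PySem.List.pyGet? PySem.List.pyIdx? PySem.Raise.InRange at *
  split_ifs with ha hb hc <;> simp_all <;> omega

theorem pyGetD_r {α : Type} {xs : List α} {i : Int} (d : α) (h : PySem.Raise.InRange xs.length i) :
    PySem.List.pyGetD xs i d = xs.getD (pvIdx xs.length i) d := by
  obtain ⟨he, hlt⟩ := pvIdx_spec h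
  unfold PySem.List.pyGetD PySem.List.pyGet?
  rw [he]
  simp [List.getD, List.getElem?_eq_getElem hlt]

theorem pySetD_r {α : Type} {xs : List α} {i : Int} (v : α) (h : PySem.Raise.InRange xs.length i) :
    PySem.List.pySetD xs i v = xs.set (pvIdx xs.length i) v := by
  obtain ⟨he, _⟩ := pvIdx_spec h
  unfold PySem.List.pySetD PySem.List.pySet?
  rw [he]; rfl

theorem pvP1 {α : Type} {xs : List α} {i : Int} (v d : α) (h : PySem.Raise.InRange xs.length i) :
    PySem.List.pyGetD (PySem.List.pySetD xs i v) i d = v := by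
  obtain ⟨_, hlt⟩ := pvIdx_spec h
  rw [pySetD_r v h, pyGetD_r d (by simpa using h), List.length_set]
  simp [List.getD, hlt]

theorem pvP2 {α : Type} {xs : List α} {i j : Int} (v d : α)
    (hi : PySem.Raise.InRange xs.length i) (hj : PySem.Raise.InRange xs.length j)
    (hne : pvIdx xs.length i ≠ pvIdx xs.length j) :
    PySem.List.pyGetD (PySem.List.pySetD xs i v) j d = PySem.List.pyGetD xs j d := by
  rw [pySetD_r v hi, pyGetD_r d (by simpa using hj), List.length_set, pyGetD_r d hj]
  simp [List.getD, hne]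

theorem pvInR_of_ge {r : List Int} {x d : Int} (hd : 0 ≤ d)
    (hx : PySem.List.pyGetD r x (-1) = d) : PySem.Raise.InRange r.length x := by
  by_cases h : PySem.Raise.InRange r.length x
  · exact h
  · rw [pyGetD_out h] at hx; omega

theorem pvInR_of_neg {r : List Int} {v : Int}
    (hv : PySem.List.pyGetD r v 0 < 0) : PySem.Raise.InRange r.length v := by
  by_cases h : PySem.Raise.InRange r.length v
  · exact h
  · rw [pyGetD_out h] at hv; omega

theorem pvEqIdx {α : Type} {xs : List α} {i j : Int} (d1 d2 : α)
    (hi : PySem.Raise.InRange xs.length i) (hj : PySem.Raise.InRange xs.length j)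
    (he : pvIdx xs.length i = pvIdx xs.length j) :
    PySem.List.pyGetD xs i d1 = PySem.List.pyGetD xs j d2 := by
  obtain ⟨_, hlt⟩ := pvIdx_spec hj
  rw [pyGetD_r d1 hi, pyGetD_r d2 hj, he, List.getD_eq_getElem _ _ hlt, List.getD_eq_getElem _ _ hlt]

-- one pvG step preserves every entry that already carries a nonnegative value
theorem pvS1 {w : Int} {st : List Int × List Int} {x : Int} (v : Int) {d : Int} (hd : 0 ≤ d)
    (hx : PySem.List.pyGetD st.1 x (-1) = d) :
    PySem.List.pyGetD (pvG w st v).1 x (-1) = d := by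
  unfold pvG
  split_ifs with hg
  · have hv := pvInR_of_neg hg
    have hxr := pvInR_of_ge hd hx
    by_cases he : pvIdx st.1.length v = pvIdx st.1.length x
    · exfalso
      have := pvEqIdx 0 (-1) hv hxr he
      omega
    · simpa [pvP2 w (-1) hv hxr he] using hx
  · exact hx

theorem pvCountP_set (p : Int → Bool) : ∀ (xs : List Int) (k : Nat) (v : Int), k < xs.length →
    (xs.set k v).countP p + (if p (xs.getD k 0) then 1 else 0)
      = xs.countP p + (if p v then 1 else 0) := by
  intro xs
  induction xs with
  | nil => intro k v h; simp at h
  | cons a t ih =>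
    intro k v h
    cases k with
    | zero => simp [List.countP_cons]; split_ifs <;> omega
    | succ k =>
      have hs : (a :: t).set (k+1) v = a :: t.set k v := rfl
      rw [hs]
      simp only [List.countP_cons, List.getD_cons_succ]
      have := ih k v (by simpa using h)
      split_ifs at this ⊢ <;> omega

-- the queue/frontier component of the inner fold is write-only:
-- the fold from (r, q) is the fold from (r, []) with q prepended
theorem pvG1 (w : Int) (ns : List Int) : ∀ (r q : List Int),
    ns.foldl (pvG w) (r, q) = ((ns.foldl (pvG w) (r, [])).1, q ++ (ns.foldl (pvG w) (r, [])).2) := by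
  induction ns with
  | nil => intro r q; simp
  | cons v ns ih =>
    intro r q
    simp only [List.foldl_cons]
    by_cases hg : PySem.List.pyGetD r v 0 < 0
    · simp only [pvG, hg, if_pos]
      simp only [List.nil_append]
      rw [ih (PySem.List.pySetD r v w) (q ++ [v]), ih (PySem.List.pySetD r v w) [v]]
      simp
    · simp only [pvG, hg, if_neg, not_false_iff]
      exact ih r q

-- the whole inner fold preserves nonnegative entries
theorem pvG2 {w : Int} {d : Int} (hd : 0 ≤ d) (ns : List Int) :
    ∀ (st : List Int × List Int) (x : Int), PySem.List.pyGetD st.1 x (-1) = d →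
    PySem.List.pyGetD (ns.foldl (pvG w) st).1 x (-1) = d := by
  induction ns with
  | nil => intro st x hx; exact hx
  | cons v ns ih =>
    intro st x hx
    exact ih _ x (pvS1 v hd hx)

-- every node the inner fold appends to the next frontier carries value w
theorem pvG3 {w : Int} (hw : 0 ≤ w) (ns : List Int) :
    ∀ (st : List Int × List Int), (∀ y ∈ st.2, PySem.List.pyGetD st.1 y (-1) = w) →
    ∀ y ∈ (ns.foldl (pvG w) st).2, PySem.List.pyGetD (ns.foldl (pvG w) st).1 y (-1) = w := by
  induction ns with
  | nil => intro st h; exact h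
  | cons v ns ih =>
    intro st h
    apply ih
    intro y hy
    by_cases hg : PySem.List.pyGetD st.1 v 0 < 0
    · have hst : pvG w st v = (PySem.List.pySetD st.1 v w, st.2 ++ [v]) := by
        simp [pvG, hg]
      rw [hst] at hy ⊢
      simp only [List.mem_append, List.mem_singleton] at hy
      rcases hy with hy | rfl
      · have := pvS1 (w := w) v hw (h y hy)
        simpa [pvG, hg] using this
      · exact pvP1 w (-1) (pvInR_of_neg hg)
    · have hst : pvG w st v = st := by simp [pvG, hg]
      rw [hst] at hy ⊢
      exact h y hy

-- bookkeeping: unvisited slots consumed = frontier nodes produced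
theorem pvG4 {w : Int} (hw : 0 ≤ w) (ns : List Int) :
    ∀ (st : List Int × List Int),
    pvNeg (ns.foldl (pvG w) st).1 + ((ns.foldl (pvG w) st).2).length
      = pvNeg st.1 + st.2.length := by
  induction ns with
  | nil => intro st; rfl
  | cons v ns ih =>
    intro st
    rw [List.foldl_cons, ih (pvG w st v)]
    by_cases hg : PySem.List.pyGetD st.1 v 0 < 0
    · have hv := pvInR_of_neg hg
      obtain ⟨_, hlt⟩ := pvIdx_spec hv
      have hset := pySetD_r (xs := st.1) w hv
      have hcount := pvCountP_set (fun x => decide (x < 0)) st.1 (pvIdx st.1.length v) w hlt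
      have hval : st.1.getD (pvIdx st.1.length v) 0 < 0 := by
        rw [← pyGetD_r 0 hv]; exact hg
      simp only [decide_eq_true_eq, hval, if_pos, if_neg (by omega : ¬ w < 0)] at hcount
      have hst : pvG w st v = (PySem.List.pySetD st.1 v w, st.2 ++ [v]) := by simp [pvG, hg]
      rw [hst]
      simp only [pvNeg, hset, List.length_append, List.length_singleton]
      omega
    · have hst : pvG w st v = st := by simp [pvG, hg]
      rw [hst]

-- A's inner loop body equals the frontier loop's once the popped parent is
-- known to sit at depth d: reach[parent] + 1 = dist + 1
theorem pvFG {p d : Int} (hd : 0 ≤ d) (ns : List Int) :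
    ∀ (st : List Int × List Int), PySem.List.pyGetD st.1 p (-1) = d →
    ns.foldl (pvF p) st = ns.foldl (pvG (d+1)) st := by
  induction ns with
  | nil => intro st _; rfl
  | cons v ns ih =>
    intro st hp
    rw [List.foldl_cons, List.foldl_cons]
    have hstep : pvF p st v = pvG (d+1) st v := by
      unfold pvF pvG
      rw [hp]
    rw [hstep]
    exact ih _ (pvS1 v hd hp)

theorem pvLoopA_cons (fuel : Nat) (adj : List (List Int)) (reach : List Int) (p : Int)
    (rest : List Int) :
    pvLoopA (fuel+1) adj reach (p :: rest)
      = pvLoopA fuel adj ((PySem.List.pyGetD adj p []).foldl (pvF p) (reach, rest)).1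
          ((PySem.List.pyGetD adj p []).foldl (pvF p) (reach, rest)).2 := rfl

theorem pvLoopB_cons (fuel : Nat) (adj : List (List Int)) (reach : List Int) (f : Int)
    (fs : List Int) (dist : Int) :
    pvLoopB (fuel+1) adj reach (f :: fs) dist
      = pvLoopB fuel adj
          ((f :: fs).foldl (fun st u => (PySem.List.pyGetD adj u []).foldl (pvG (dist+1)) st) (reach, [])).1
          ((f :: fs).foldl (fun st u => (PySem.List.pyGetD adj u []).foldl (pvG (dist+1)) st) (reach, [])).2
          (dist + 1) := rfl

theorem pvRunB_unroll (adj : List (List Int)) (f1 : List Int) :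
    ∀ (reach f2 : List Int) (d : Int) (fuel : Nat),
    pvRunB adj reach f1 f2 d fuel
      = pvLoopB fuel adj
          (f1.foldl (fun st u => (PySem.List.pyGetD adj u []).foldl (pvG (d+1)) st) (reach, f2)).1
          (f1.foldl (fun st u => (PySem.List.pyGetD adj u []).foldl (pvG (d+1)) st) (reach, f2)).2
          (d+1) := by
  induction f1 with
  | nil => intro reach f2 d fuel; rfl
  | cons u f1 ih =>
    intro reach f2 d fuel
    rw [List.foldl_cons]
    exact ih _ _ d fuel

theorem pvLB (fuel : Nat) (adj : List (List Int)) (reach frontier : List Int) (d : Int) :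
    pvLoopB (fuel+1) adj reach frontier d = pvRunB adj reach frontier [] d fuel := by
  cases frontier with
  | nil => cases fuel <;> rfl
  | cons f fs => rw [pvLoopB_cons, pvRunB_unroll]

-- MAIN INVARIANT, stage 1: if the pending queue of A is (rest of current layer
-- f1, all at depth d) ++ (partial next layer f2, all at depth d+1), then A's
-- vertex-at-a-time loop and the layer-at-a-time loop compute the same reach.
theorem pvMain (adj : List (List Int)) : ∀ (μ : Nat),
    ∀ (fuel1 fuel2 : Nat) (reach f1 f2 : List Int) (d : Int),
    2 * pvNeg reach + 2 * f2.length + f1.length ≤ μ → μ ≤ fuel1 → μ ≤ fuel2 → 0 ≤ d →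
    (∀ x ∈ f1, PySem.List.pyGetD reach x (-1) = d) →
    (∀ y ∈ f2, PySem.List.pyGetD reach y (-1) = d + 1) →
    pvLoopA fuel1 adj reach (f1 ++ f2) = pvRunB adj reach f1 f2 d fuel2 := by
  intro μ
  induction μ using Nat.strong_induction_on with
  | _ μ IH =>
    intro fuel1 fuel2 reach f1 f2 d hμ h1 h2 hd hf1 hf2
    cases f1 with
    | nil =>
      cases f2 with
      | nil => cases fuel1 <;> cases fuel2 <;> rfl
      | cons y f2' =>
        have hlen : (y :: f2').length = f2'.length + 1 := rfl
        cases fuel2 with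
        | zero => omega
        | succ k =>
          show pvLoopA fuel1 adj reach ([] ++ (y :: f2')) = pvLoopB (k+1) adj reach (y :: f2') (d+1)
          rw [pvLB k adj reach (y :: f2') (d+1), List.nil_append]
          have hrec := IH (μ - 1) (by omega) fuel1 k reach (y :: f2') [] (d+1)
            (by simp only [List.length_nil]; omega) (by omega) (by omega) (by omega)
            hf2 (by intro y hy; simp at hy)
          rw [List.append_nil] at hrec
          exact hrec
    | cons u f1' =>
      have hlen1 : (u :: f1').length = f1'.length + 1 := rfl
      cases fuel1 with
      | zero => omega
      | succ k1 =>
        have hu : PySem.List.pyGetD reach u (-1) = d := hf1 u (by simp)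
        have hAB := pvFG hd (PySem.List.pyGetD adj u []) (reach, f1' ++ f2) hu
        rw [show (u :: f1') ++ f2 = u :: (f1' ++ f2) from rfl, pvLoopA_cons, hAB]
        have hG1q := pvG1 (d+1) (PySem.List.pyGetD adj u []) reach (f1' ++ f2)
        have hG1f := pvG1 (d+1) (PySem.List.pyGetD adj u []) reach f2
        set Y := (PySem.List.pyGetD adj u []).foldl (pvG (d+1)) (reach, []) with hY
        rw [hG1q]
        show pvLoopA k1 adj Y.1 (f1' ++ f2 ++ Y.2) = pvRunB adj reach (u :: f1') f2 d fuel2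
        have hRB : pvRunB adj reach (u :: f1') f2 d fuel2 = pvRunB adj Y.1 f1' (f2 ++ Y.2) d fuel2 := by
          show pvRunB adj ((PySem.List.pyGetD adj u []).foldl (pvG (d+1)) (reach, f2)).1 f1'
            ((PySem.List.pyGetD adj u []).foldl (pvG (d+1)) (reach, f2)).2 d fuel2 = _
          rw [hG1f]
        rw [hRB, List.append_assoc]
        have hcnt := pvG4 (show (0:Int) ≤ d+1 by omega) (PySem.List.pyGetD adj u []) (reach, ([] : List Int))
        apply IH (μ - 1) (by omega) k1 fuel2 Y.1 f1' (f2 ++ Y.2) d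
        · have : pvNeg Y.1 + Y.2.length = pvNeg reach := by simpa using hcnt
          simp only [List.length_append]
          omega
        · omega
        · omega
        · exact hd
        · intro x hx
          exact pvG2 hd _ (reach, ([] : List Int)) x (hf1 x (by simp [hx]))
        · intro y hy
          rcases List.mem_append.1 hy with hy | hy
          · exact pvG2 (by omega) _ (reach, ([] : List Int)) y (hf2 y hy)
          · exact pvG3 (by omega) _ (reach, ([] : List Int)) (by intro z hz; simp at hz) y hy

theorem pvInitReach_start {n s : Int} (hn : 1 ≤ n) (hs1 : -(n+1) ≤ s) (hs2 : s ≤ n) :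
    PySem.List.pyGetD (pvInitReach n s) s (-1) = 0 := by
  unfold pvInitReach
  apply pvP1
  have hlen : ((PySem.List.pyRange 0 (n+1) 1).map (fun _ => (-1 : Int))).length = (n+1).toNat := by
    rw [List.length_map, PySem.List.length_pyRange_one]; norm_num
  rw [hlen]
  constructor <;> omega

theorem pvInitReach_len (n s : Int) : (pvInitReach n s).length = (n+1).toNat := by
  unfold pvInitReach
  rw [PySem.List.length_pySetD, List.length_map, PySem.List.length_pyRange_one]
  norm_num

theorem pvKey {n s : Int} (adj : List (List Int)) (hn : 1 ≤ n) (hs1 : -(n+1) ≤ s) (hs2 : s ≤ n) :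
    pvLoopA (pvFuel n) adj (pvInitReach n s) [s]
      = pvLoopB (pvFuel n) adj (pvInitReach n s) [s] 0 := by
  have hneg : pvNeg (pvInitReach n s) ≤ (n+1).toNat := by
    have := List.countP_le_length (l := pvInitReach n s) (p := fun x => decide (x < 0))
    rw [pvInitReach_len] at this
    exact this
  have hF : pvFuel n = ((2*(n+1)).toNat + 1) + 1 := rfl
  rw [hF, pvLB]
  have hrec := pvMain adj (2 * pvNeg (pvInitReach n s) + 1)
    ((2*(n+1)).toNat + 1 + 1) ((2*(n+1)).toNat + 1) (pvInitReach n s) [s] [] 0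
    (by simp) (by omega) (by omega) (by omega)
    (by intro x hx; simp only [List.mem_singleton] at hx; subst hx
        exact pvInitReach_start hn hs1 hs2)
    (by intro y hy; simp at hy)
  rw [List.append_nil] at hrec
  exact hrec

-- ===== stage 2: the frontier loop equals B's edge-relaxation rounds =====

-- a single conditional write, and a batch of them
def pvW (w : Int) (r : List Int) (v : Int) : List Int :=
  if PySem.List.pyGetD r v 0 < 0 then PySem.List.pySetD r v w else r

def pvWriteAll (w : Int) (ns : List Int) (r : List Int) : List Int := ns.foldl (pvW w) r

-- the write requests one edge generates against the round's start state r
def pvE0 (e : List Int) : Int := PySem.List.pyGetD e 0 0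
def pvE1 (e : List Int) : Int := PySem.List.pyGetD e 1 0

def pvReqs (d : Int) (r : List Int) (e : List Int) : List Int :=
  (if PySem.List.pyGetD r (pvE0 e) 0 = d then [pvE1 e] else [])
    ++ (if PySem.List.pyGetD r (pvE1 e) 0 = d then [pvE0 e] else [])

theorem pvInR_of_idx {nn : Nat} {i : Int} {k : Nat} (h : PySem.List.pyIdx? nn i = some k) :
    PySem.Raise.InRange nn i ∧ pvIdx nn i = k := by
  by_cases hr : PySem.Raise.InRange nn i
  · obtain ⟨he, _⟩ := pvIdx_spec hr
    rw [he] at h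
    exact ⟨hr, Option.some.inj h⟩
  · exfalso
    unfold PySem.List.pyIdx? PySem.Raise.InRange at *
    split_ifs at h <;> simp_all <;> try omega

theorem pvW_length (w : Int) (r : List Int) (v : Int) : (pvW w r v).length = r.length := by
  unfold pvW
  split_ifs with hg
  · exact PySem.List.length_pySetD r v w
  · rfl

theorem pvGetD_set {xs : List Int} {i k : Nat} (v : Int) (hk : k < xs.length) :
    (xs.set i v).getD k 0 = if i = k then v else xs.getD k 0 := by
  rw [List.getD_eq_getElem _ 0 (by simpa using hk), List.getElem_set]
  split_ifs with h
  · rfl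
  · exact (List.getD_eq_getElem _ _ hk).symm

theorem pvW_getD {w : Int} (hw : 0 ≤ w) (r : List Int) (v : Int) (k : Nat) (hk : k < r.length) :
    (pvW w r v).getD k 0 =
      if r.getD k 0 < 0 ∧ PySem.List.pyIdx? r.length v = some k then w else r.getD k 0 := by
  unfold pvW
  split_ifs with hg hc hc
  · -- write fired, and this is slot k
    have hv := pvInR_of_neg hg
    obtain ⟨he, _⟩ := pvIdx_spec hv
    have hik : pvIdx r.length v = k := by
      have h2 := hc.2
      rw [he] at h2
      exact Option.some.inj h2
    rw [pySetD_r w hv, pvGetD_set w hk, if_pos hik]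
  · -- write fired elsewhere
    have hv := pvInR_of_neg hg
    obtain ⟨he, _⟩ := pvIdx_spec hv
    have hik : pvIdx r.length v ≠ k := by
      intro hik
      apply hc
      constructor
      · rw [← hik, ← pyGetD_r 0 hv]
        exact hg
      · rw [he, hik]
    rw [pySetD_r w hv, pvGetD_set w hk, if_neg hik]
  · -- no write, but condition claims slot k negative via v
    exfalso
    obtain ⟨hv, hik⟩ := pvInR_of_idx hc.2
    apply hg
    rw [pyGetD_r 0 hv, hik]
    exact hc.1
  · rfl

theorem pvGfst (w : Int) (ns : List Int) : ∀ (r q : List Int),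
    (ns.foldl (pvG w) (r, q)).1 = pvWriteAll w ns r := by
  induction ns with
  | nil => intro r q; rfl
  | cons v ns ih =>
    intro r q
    simp only [pvWriteAll, List.foldl_cons]
    by_cases hg : PySem.List.pyGetD r v 0 < 0
    · rw [show pvG w (r, q) v = (PySem.List.pySetD r v w, q ++ [v]) by simp [pvG, hg],
          show pvW w r v = PySem.List.pySetD r v w by simp [pvW, hg]]
      exact ih _ _
    · rw [show pvG w (r, q) v = (r, q) by simp [pvG, hg],
          show pvW w r v = r by simp [pvW, hg]]
      exact ih _ _

theorem pvWriteAll_length (w : Int) (ns : List Int) : ∀ (r : List Int),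
    (pvWriteAll w ns r).length = r.length := by
  induction ns with
  | nil => intro r; rfl
  | cons v ns ih =>
    intro r
    simp only [pvWriteAll, List.foldl_cons] at *
    rw [ih (pvW w r v), pvW_length]

theorem pvWriteAll_getD {w : Int} (hw : 0 ≤ w) (ns : List Int) : ∀ (r : List Int) (k : Nat),
    k < r.length →
    (pvWriteAll w ns r).getD k 0 =
      if r.getD k 0 < 0 ∧ ∃ v ∈ ns, PySem.List.pyIdx? r.length v = some k then w
      else r.getD k 0 := by
  induction ns with
  | nil =>
    intro r k hk
    simp [pvWriteAll]
  | cons v ns ih =>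
    intro r k hk
    have hlen := pvW_length w r v
    simp only [pvWriteAll, List.foldl_cons] at *
    have hrec := ih (pvW w r v) k (by rw [hlen]; exact hk)
    rw [hrec, hlen]
    have hstep := pvW_getD hw r v k hk
    by_cases hvk : PySem.List.pyIdx? r.length v = some k
    · by_cases hneg : r.getD k 0 < 0
      · rw [if_pos ⟨hneg, hvk⟩] at hstep
        rw [hstep, if_neg (fun h => absurd h.1 (by omega)), if_pos ⟨hneg, ⟨v, by simp [hvk]⟩⟩]
      · rw [if_neg (by tauto)] at hstep
        rw [hstep, if_neg (by tauto), if_neg (by tauto)]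
    · rw [if_neg (by tauto)] at hstep
      rw [hstep]
      by_cases hns : r.getD k 0 < 0 ∧ ∃ u ∈ ns, PySem.List.pyIdx? r.length u = some k
      · rw [if_pos hns, if_pos ⟨hns.1, by obtain ⟨u, hu1, hu2⟩ := hns.2; exact ⟨u, by simp [hu1], hu2⟩⟩]
      · rw [if_neg hns, if_neg (by
          rintro ⟨h1, u, hu1, hu2⟩
          rcases List.mem_cons.1 hu1 with rfl | hu1
          · exact hvk hu2
          · exact hns ⟨h1, u, hu1, hu2⟩)]

theorem pvGsnd {w : Int} (hw : 0 ≤ w) (ns : List Int) : ∀ (r q : List Int) (k : Nat),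
    ((∃ x ∈ (ns.foldl (pvG w) (r, q)).2, PySem.List.pyIdx? r.length x = some k) ↔
      (∃ x ∈ q, PySem.List.pyIdx? r.length x = some k) ∨
        (r.getD k 0 < 0 ∧ ∃ v ∈ ns, PySem.List.pyIdx? r.length v = some k)) := by
  induction ns with
  | nil =>
    intro r q k
    simp
  | cons v ns ih =>
    intro r q k
    simp only [List.foldl_cons]
    by_cases hg : PySem.List.pyGetD r v 0 < 0
    · have hv := pvInR_of_neg hg
      obtain ⟨he, _⟩ := pvIdx_spec hv
      rw [show pvG w (r, q) v = (PySem.List.pySetD r v w, q ++ [v]) by simp [pvG, hg]]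
      have hlen : (PySem.List.pySetD r v w).length = r.length := PySem.List.length_pySetD r v w
      have hrec := ih (PySem.List.pySetD r v w) (q ++ [v]) k
      rw [hlen] at hrec
      rw [hrec]
      have hset : ∀ j : Nat, j < r.length →
          (PySem.List.pySetD r v w).getD j 0 = if pvIdx r.length v = j then w else r.getD j 0 := by
        intro j hj
        rw [pySetD_r w hv, pvGetD_set w hj]
      constructor
      · rintro (⟨x, hx, hxk⟩ | ⟨hneg, hex⟩)
        · rcases List.mem_append.1 hx with hx | hx
          · exact Or.inl ⟨x, hx, hxk⟩
          · rw [List.mem_singleton] at hx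
            rw [hx, he] at hxk
            have h' := Option.some.inj hxk
            refine Or.inr ⟨?_, ⟨v, by simp, by rw [he, h']⟩⟩
            rw [← h', ← pyGetD_r 0 hv]
            exact hg
        · have hk : k < r.length := by
            obtain ⟨u, hu, huk⟩ := hex
            obtain ⟨hr, hik⟩ := pvInR_of_idx huk
            exact hik ▸ (pvIdx_spec hr).2
          rw [hset k hk] at hneg
          by_cases hik : pvIdx r.length v = k
          · rw [if_pos hik] at hneg; omega
          · rw [if_neg hik] at hneg
            obtain ⟨u, hu, huk⟩ := hex
            exact Or.inr ⟨hneg, ⟨u, by simp [hu], huk⟩⟩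
      · rintro (⟨x, hx, hxk⟩ | ⟨hneg, u, hu, huk⟩)
        · exact Or.inl ⟨x, List.mem_append.2 (Or.inl hx), hxk⟩
        · have hk : k < r.length := by
            have := pvInR_of_idx huk
            exact this.2 ▸ (pvIdx_spec this.1).2
          rcases List.mem_cons.1 hu with rfl | hu
          · exact Or.inl ⟨u, List.mem_append.2 (Or.inr (by simp)), huk⟩
          · by_cases hik : pvIdx r.length v = k
            · refine Or.inl ⟨v, List.mem_append.2 (Or.inr (by simp)), by rw [he, hik]⟩
            · refine Or.inr ⟨?_, ⟨u, hu, huk⟩⟩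
              rw [hset k hk, if_neg hik]
              exact hneg
    · rw [show pvG w (r, q) v = (r, q) by simp [pvG, hg]]
      rw [ih r q k]
      constructor
      · rintro (h | ⟨hneg, u, hu, huk⟩)
        · exact Or.inl h
        · exact Or.inr ⟨hneg, ⟨u, by simp [hu], huk⟩⟩
      · rintro (h | ⟨hneg, u, hu, huk⟩)
        · exact Or.inl h
        · rcases List.mem_cons.1 hu with rfl | hu
          · exfalso
            obtain ⟨hr, hik⟩ := pvInR_of_idx huk
            rw [← hik, ← pyGetD_r 0 hr] at hneg
            exact hg hneg
          · exact Or.inr ⟨hneg, ⟨u, hu, huk⟩⟩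

theorem pvWriteAll_ext {w : Int} (hw : 0 ≤ w) (ws1 ws2 r : List Int)
    (h : ∀ k : Nat, (∃ v ∈ ws1, PySem.List.pyIdx? r.length v = some k) ↔
      (∃ v ∈ ws2, PySem.List.pyIdx? r.length v = some k)) :
    pvWriteAll w ws1 r = pvWriteAll w ws2 r := by
  apply List.ext_getElem (by rw [pvWriteAll_length, pvWriteAll_length])
  intro k h1 h2
  have hk : k < r.length := by rw [pvWriteAll_length] at h1; exact h1
  have e1 := pvWriteAll_getD hw ws1 r k hk
  have e2 := pvWriteAll_getD hw ws2 r k hk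
  rw [List.getD_eq_getElem _ _ h1] at e1
  rw [List.getD_eq_getElem _ _ h2] at e2
  rw [e1, e2]
  exact if_congr (and_congr_right fun _ => h k) rfl rfl

theorem pvWriteAll_pyGetD_eq_d {w d : Int} (hd : 0 ≤ d) (hne : d ≠ w) (ns r : List Int) (x : Int)
    (hw : 0 ≤ w) :
    (PySem.List.pyGetD (pvWriteAll w ns r) x 0 = d ↔ PySem.List.pyGetD r x 0 = d) := by
  have hlen := pvWriteAll_length w ns r
  by_cases hx : PySem.Raise.InRange r.length x
  · obtain ⟨he, hlt⟩ := pvIdx_spec hx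
    have hx' : PySem.Raise.InRange (pvWriteAll w ns r).length x := by rw [hlen]; exact hx
    rw [pyGetD_r 0 hx, pyGetD_r 0 hx']
    unfold pvIdx
    rw [hlen]
    have := pvWriteAll_getD hw ns r (pvIdx r.length x) hlt
    unfold pvIdx at this
    rw [this]
    split_ifs with hcond
    · constructor
      · intro hwd; exact absurd hwd.symm hne
      · intro hrd; exfalso; rw [hrd] at hcond; omega
    · exact Iff.rfl
  · have hx' : ¬ PySem.Raise.InRange (pvWriteAll w ns r).length x := by rw [hlen]; exact hx
    rw [pyGetD_out hx, pyGetD_out hx']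

theorem pvWriteAll_id (w : Int) : ∀ (ns r : List Int),
    (∀ v ∈ ns, ¬ PySem.List.pyGetD r v 0 < 0) → pvWriteAll w ns r = r := by
  intro ns
  induction ns with
  | nil => intro r _; rfl
  | cons v ns ih =>
    intro r h
    simp only [pvWriteAll, List.foldl_cons]
    rw [show pvW w r v = r by simp [pvW, h v (by simp)]]
    exact ih r (fun u hu => h u (by simp [hu]))

-- one edge of B's round, against a round-start state r0 that agrees with the
-- current state r on which entries carry the value d
theorem pvEdge1 {d : Int} (hd : 0 ≤ d) (r0 r : List Int) (c : Bool) (e : List Int)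
    (ha : PySem.Raise.InRange r.length (pvE0 e)) (hb : PySem.Raise.InRange r.length (pvE1 e))
    (hstab : ∀ x, PySem.List.pyGetD r x 0 = d ↔ PySem.List.pyGetD r0 x 0 = d) :
    pvEdgeStep d (r, c) e =
      (pvWriteAll (d+1) (pvReqs d r0 e) r,
        c || (pvReqs d r0 e).any (fun v => decide (PySem.List.pyGetD r v 0 < 0))) := by
  have hA0 : (PySem.List.pyGetD r (pvE0 e) 0 = d) ↔ (PySem.List.pyGetD r0 (pvE0 e) 0 = d) :=
    hstab _
  have hB0 : (PySem.List.pyGetD r (pvE1 e) 0 = d) ↔ (PySem.List.pyGetD r0 (pvE1 e) 0 = d) :=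
    hstab _
  have hdd : d + 1 ≠ d := by omega
  simp only [pvEdgeStep, pvReqs, pvE0, pvE1] at *
  by_cases hA : PySem.List.pyGetD r (PySem.List.pyGetD e 0 0) 0 = d
  · by_cases hB : PySem.List.pyGetD r (PySem.List.pyGetD e 1 0) 0 = d
    · -- both endpoints at level d: nothing can be written
      have hna : ¬ PySem.List.pyGetD r (PySem.List.pyGetD e 0 0) 0 < 0 := by omega
      have hnb : ¬ PySem.List.pyGetD r (PySem.List.pyGetD e 1 0) 0 < 0 := by omega
      rw [if_pos (hA0.mp hA), if_pos (hB0.mp hB)]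
      simp [pvW, pvWriteAll, hna, hnb]
    · -- only e0 at level d: the request list is [e1]
      rw [if_pos (hA0.mp hA), if_neg (fun h => hB (hB0.mpr h))]
      by_cases hbn : PySem.List.pyGetD r (PySem.List.pyGetD e 1 0) 0 < 0
      · have hp1 : PySem.List.pyGetD
            (PySem.List.pySetD r (PySem.List.pyGetD e 1 0) (d+1)) (PySem.List.pyGetD e 1 0) 0
            = d + 1 := pvP1 _ _ hb
        simp [pvW, pvWriteAll, hA, hbn, hp1, hdd]
      · simp [pvW, pvWriteAll, hbn, hB]
  · by_cases hB : PySem.List.pyGetD r (PySem.List.pyGetD e 1 0) 0 = d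
    · -- only e1 at level d: the request list is [e0]
      rw [if_neg (fun h => hA (hA0.mpr h)), if_pos (hB0.mp hB)]
      by_cases han : PySem.List.pyGetD r (PySem.List.pyGetD e 0 0) 0 < 0
      · simp [pvW, pvWriteAll, hA, hB, han]
      · simp [pvW, pvWriteAll, hA, han]
    · -- neither endpoint at level d: no requests
      rw [if_neg (fun h => hA (hA0.mpr h)), if_neg (fun h => hB (hB0.mpr h))]
      simp [pvW, pvWriteAll, hA, hB]

-- B's whole round over the edge list is one batch of conditional writes
theorem pvEfold {d : Int} (hd : 0 ≤ d) (r0 : List Int) : ∀ (es : List (List Int)) (r : List Int) (c : Bool),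
    (∀ e ∈ es, PySem.Raise.InRange r0.length (pvE0 e) ∧ PySem.Raise.InRange r0.length (pvE1 e)) →
    r.length = r0.length →
    (∀ x, PySem.List.pyGetD r x 0 = d ↔ PySem.List.pyGetD r0 x 0 = d) →
    es.foldl (pvEdgeStep d) (r, c) =
      (pvWriteAll (d+1) (es.flatMap (pvReqs d r0)) r,
        c || (es.flatMap (pvReqs d r0)).any (fun v => decide (PySem.List.pyGetD r v 0 < 0))) := by
  intro es
  induction es with
  | nil =>
    intro r c _ _ _
    simp [pvWriteAll]
  | cons e es ih =>
    intro r c hes hlen hstab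
    have ha : PySem.Raise.InRange r.length (pvE0 e) := by rw [hlen]; exact (hes e (by simp)).1
    have hb : PySem.Raise.InRange r.length (pvE1 e) := by rw [hlen]; exact (hes e (by simp)).2
    rw [List.foldl_cons, pvEdge1 hd r0 r c e ha hb hstab]
    set r1 := pvWriteAll (d+1) (pvReqs d r0 e) r with hr1
    have hlen1 : r1.length = r0.length := by rw [hr1, pvWriteAll_length, hlen]
    have hstab1 : ∀ x, PySem.List.pyGetD r1 x 0 = d ↔ PySem.List.pyGetD r0 x 0 = d := by
      intro x
      rw [hr1, pvWriteAll_pyGetD_eq_d hd (by omega) _ _ _ (by omega)]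
      exact hstab x
    rw [ih r1 _ (fun e' he' => hes e' (by simp [he'])) hlen1 hstab1]
    rw [List.flatMap_cons]
    refine Prod.ext ?_ ?_
    · -- reach component: batched writes compose over ++
      show pvWriteAll (d+1) (es.flatMap (pvReqs d r0)) r1 = _
      rw [hr1]
      unfold pvWriteAll
      rw [← List.foldl_append]
    · -- changed flag
      show ((c || (pvReqs d r0 e).any (fun v => decide (PySem.List.pyGetD r v 0 < 0)))
            || (es.flatMap (pvReqs d r0)).any (fun v => decide (PySem.List.pyGetD r1 v 0 < 0))) = _
      rw [List.any_append, Bool.or_assoc]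
      by_cases hA : (pvReqs d r0 e).any (fun v => decide (PySem.List.pyGetD r v 0 < 0)) = true
      · -- a write happened on e: both sides are true
        rw [hA]
        simp
      · -- no write on e: r1 = r
        have hr1r : r1 = r := by
          rw [hr1]
          apply pvWriteAll_id
          intro v hv
          rw [List.any_eq_true] at hA
          push_neg at hA
          have := hA v hv
          simpa using this
        rw [hr1r]

-- a round at a level no node carries does nothing and reports no change
theorem pvRound_noop {d : Int} (hd : 0 ≤ d) (edges : List (List Int)) (r : List Int)
    (hes : ∀ e ∈ edges, PySem.Raise.InRange r.length (pvE0 e) ∧ PySem.Raise.InRange r.length (pvE1 e))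
    (hnod : ∀ k, k < r.length → r.getD k 0 ≠ d) :
    edges.foldl (pvEdgeStep d) (r, false) = (r, false) := by
  have hflat : edges.flatMap (pvReqs d r) = [] := by
    rw [List.flatMap_eq_nil_iff]
    intro e he
    have ha := (hes e he).1
    have hb := (hes e he).2
    unfold pvReqs
    rw [if_neg, if_neg]
    · rfl
    · rw [pyGetD_r 0 hb]
      exact hnod _ (pvIdx_spec hb).2
    · rw [pyGetD_r 0 ha]
      exact hnod _ (pvIdx_spec ha).2
  rw [pvEfold hd r edges r false hes rfl (fun _ => Iff.rfl), hflat]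
  simp [pvWriteAll]

theorem pvGetD_set' {α : Type} {xs : List α} {i k : Nat} (v d : α) (hk : k < xs.length) :
    (xs.set i v).getD k d = if i = k then v else xs.getD k d := by
  rw [List.getD_eq_getElem _ d (by simpa using hk), List.getElem_set]
  split_ifs with h
  · rfl
  · exact (List.getD_eq_getElem _ _ hk).symm

-- one pySetD seen through pyGetD, as a single if
theorem pvPset_get {α : Type} {xs : List α} {i j : Int} (v d : α)
    (hi : PySem.Raise.InRange xs.length i) (hj : PySem.Raise.InRange xs.length j) :
    PySem.List.pyGetD (PySem.List.pySetD xs i v) j d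
      = if pvIdx xs.length i = pvIdx xs.length j then v else PySem.List.pyGetD xs j d := by
  obtain ⟨_, hlt⟩ := pvIdx_spec hj
  have hj' : PySem.Raise.InRange (PySem.List.pySetD xs i v).length j := by
    rw [PySem.List.length_pySetD]; exact hj
  rw [pySetD_r v hi, pyGetD_r d hj, pyGetD_r d (by simpa [PySem.List.length_pySetD] using hj)]
  have hidx : pvIdx (xs.set (pvIdx xs.length i) v).length j = pvIdx xs.length j := by
    rw [List.length_set]
  rw [hidx, pvGetD_set' v d hlt]

theorem pvAdjStep_len (adj : List (List Int)) (e : List Int) :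
    (pvAdjStep adj e).length = adj.length := by
  unfold pvAdjStep
  rw [PySem.List.length_pySetD, PySem.List.length_pySetD]

-- what one pvAdjStep adds to the list a node u sees
theorem pvAdjStep_mem {L : Nat} (adj : List (List Int)) (e : List Int) (hlen : adj.length = L)
    (ha : PySem.Raise.InRange L (pvE0 e)) (hb : PySem.Raise.InRange L (pvE1 e))
    (u x : Int) (hu : PySem.Raise.InRange L u) :
    (x ∈ PySem.List.pyGetD (pvAdjStep adj e) u [] ↔
      x ∈ PySem.List.pyGetD adj u [] ∨
        (pvIdx L (pvE0 e) = pvIdx L u ∧ x = pvE1 e) ∨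
        (pvIdx L (pvE1 e) = pvIdx L u ∧ x = pvE0 e)) := by
  subst hlen
  have he0 : PySem.List.pyGetD e 0 0 = pvE0 e := rfl
  have he1 : PySem.List.pyGetD e 1 0 = pvE1 e := rfl
  simp only [pvAdjStep, he0, he1]
  have hA1len : (PySem.List.pySetD adj (pvE0 e) (PySem.List.pyGetD adj (pvE0 e) [] ++ [pvE1 e])).length = adj.length :=
    PySem.List.length_pySetD _ _ _
  rw [pvPset_get _ _ (by rw [hA1len]; exact hb) (by rw [hA1len]; exact hu)]
  have hidx1 : ∀ i : Int, pvIdx (PySem.List.pySetD adj (pvE0 e) (PySem.List.pyGetD adj (pvE0 e) [] ++ [pvE1 e])).length i = pvIdx adj.length i := by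
    intro i; rw [hA1len]
  rw [hidx1, hidx1]
  rw [pvPset_get _ _ ha hb, pvPset_get _ _ ha hu]
  by_cases hbu : pvIdx adj.length (pvE1 e) = pvIdx adj.length u
  · rw [if_pos hbu]
    by_cases hab : pvIdx adj.length (pvE0 e) = pvIdx adj.length (pvE1 e)
    · rw [if_pos hab]
      have hau : pvIdx adj.length (pvE0 e) = pvIdx adj.length u := hab.trans hbu
      have hgu : PySem.List.pyGetD adj (pvE0 e) [] = PySem.List.pyGetD adj u [] :=
        pvEqIdx [] [] ha hu hau
      simp only [List.mem_append, List.mem_singleton, hgu]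
      constructor
      · rintro ((h | rfl) | rfl)
        · exact Or.inl h
        · exact Or.inr (Or.inl ⟨hau, rfl⟩)
        · exact Or.inr (Or.inr ⟨hbu, rfl⟩)
      · rintro (h | ⟨_, rfl⟩ | ⟨_, rfl⟩)
        · exact Or.inl (Or.inl h)
        · exact Or.inl (Or.inr rfl)
        · exact Or.inr rfl
    · rw [if_neg hab]
      have hgu : PySem.List.pyGetD adj (pvE1 e) [] = PySem.List.pyGetD adj u [] :=
        pvEqIdx [] [] hb hu hbu
      simp only [List.mem_append, List.mem_singleton, hgu]
      constructor
      · rintro (h | rfl)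
        · exact Or.inl h
        · exact Or.inr (Or.inr ⟨hbu, rfl⟩)
      · rintro (h | ⟨hau, rfl⟩ | ⟨_, rfl⟩)
        · exact Or.inl h
        · exact absurd (hau.trans hbu.symm) hab
        · exact Or.inr rfl
  · rw [if_neg hbu]
    by_cases hau : pvIdx adj.length (pvE0 e) = pvIdx adj.length u
    · rw [if_pos hau]
      have hgu : PySem.List.pyGetD adj (pvE0 e) [] = PySem.List.pyGetD adj u [] :=
        pvEqIdx [] [] ha hu hau
      simp only [List.mem_append, List.mem_singleton, hgu]
      constructor
      · rintro (h | rfl)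
        · exact Or.inl h
        · exact Or.inr (Or.inl ⟨hau, rfl⟩)
      · rintro (h | ⟨_, rfl⟩ | ⟨hbu', rfl⟩)
        · exact Or.inl h
        · exact Or.inr rfl
        · exact absurd hbu' hbu
    · rw [if_neg hau]
      constructor
      · intro h
        exact Or.inl h
      · rintro (h | ⟨hau', rfl⟩ | ⟨hbu', rfl⟩)
        · exact h
        · exact absurd hau' hau
        · exact absurd hbu' hbu

theorem pvAdjChar_aux {L : Nat} : ∀ (es : List (List Int)) (adj : List (List Int)),
    adj.length = L →
    (∀ e ∈ es, PySem.Raise.InRange L (pvE0 e) ∧ PySem.Raise.InRange L (pvE1 e)) →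
    ∀ (u x : Int), PySem.Raise.InRange L u →
    (x ∈ PySem.List.pyGetD (es.foldl pvAdjStep adj) u [] ↔
      x ∈ PySem.List.pyGetD adj u [] ∨
        ∃ e ∈ es, (pvIdx L (pvE0 e) = pvIdx L u ∧ x = pvE1 e) ∨
          (pvIdx L (pvE1 e) = pvIdx L u ∧ x = pvE0 e)) := by
  intro es
  induction es with
  | nil =>
    intro adj _ _ u x _
    simp
  | cons e es ih =>
    intro adj hlen hes u x hu
    rw [List.foldl_cons]
    rw [ih (pvAdjStep adj e) (by rw [pvAdjStep_len]; exact hlen)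
        (fun e' he' => hes e' (by simp [he'])) u x hu]
    rw [pvAdjStep_mem adj e hlen (hes e (by simp)).1 (hes e (by simp)).2 u x hu]
    constructor
    · rintro ((h | h) | ⟨e', he', h⟩)
      · exact Or.inl h
      · exact Or.inr ⟨e, by simp, h⟩
      · exact Or.inr ⟨e', by simp [he'], h⟩
    · rintro (h | ⟨e', he', h⟩)
      · exact Or.inl (Or.inl h)
      · rcases List.mem_cons.1 he' with rfl | he'
        · exact Or.inl (Or.inr h)
        · exact Or.inr ⟨e', he', h⟩

theorem pvAdjChar (n : Int) (edges : List (List Int))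
    (hes : ∀ e ∈ edges, PySem.Raise.InRange (n+1).toNat (pvE0 e) ∧ PySem.Raise.InRange (n+1).toNat (pvE1 e))
    (u x : Int) (hu : PySem.Raise.InRange (n+1).toNat u) :
    (x ∈ PySem.List.pyGetD (pvInitAdj n edges) u [] ↔
      ∃ e ∈ edges, (pvIdx (n+1).toNat (pvE0 e) = pvIdx (n+1).toNat u ∧ x = pvE1 e) ∨
        (pvIdx (n+1).toNat (pvE1 e) = pvIdx (n+1).toNat u ∧ x = pvE0 e)) := by
  unfold pvInitAdj
  have hlen0 : ((PySem.List.pyRange 0 (n+1) 1).map (fun _ => ([] : List Int))).length = (n+1).toNat := by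
    rw [List.length_map, PySem.List.length_pyRange_one]; norm_num
  rw [pvAdjChar_aux edges _ hlen0 hes u x hu]
  have h0 : PySem.List.pyGetD ((PySem.List.pyRange 0 (n+1) 1).map (fun _ => ([] : List Int))) u [] = [] := by
    have hu' : PySem.Raise.InRange ((PySem.List.pyRange 0 (n+1) 1).map (fun _ => ([] : List Int))).length u := by
      rw [hlen0]; exact hu
    rw [pyGetD_r [] hu']
    rcases hx : ((PySem.List.pyRange 0 (n+1) 1).map (fun _ => ([] : List Int)))[pvIdx ((PySem.List.pyRange 0 (n+1) 1).map (fun _ => ([] : List Int))).length u]? with _ | y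
    · simp [List.getD_eq_getElem?_getD, hx]
    · have hy : y ∈ (PySem.List.pyRange 0 (n+1) 1).map (fun _ => ([] : List Int)) :=
        List.mem_of_getElem? hx
      rw [List.mem_map] at hy
      obtain ⟨_, _, rfl⟩ := hy
      simp [List.getD_eq_getElem?_getD, hx]
  rw [h0]
  simp

theorem pvFoldl_flatMap {α β σ : Type} (g : σ → β → σ) (f : α → List β) : ∀ (l : List α) (init : σ),
    (l.flatMap f).foldl g init = l.foldl (fun acc x => (f x).foldl g acc) init := by
  intro l
  induction l with
  | nil => intro init; rfl
  | cons a l ih =>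
    intro init
    rw [List.flatMap_cons, List.foldl_append, List.foldl_cons, ih]

theorem pvRounds_cons_eq (edges : List (List Int)) (ds : List Int) (r : List Int) (d : Int) :
    pvRounds edges (d :: ds) r =
      (if (edges.foldl (pvEdgeStep d) (r, false)).2 then
        pvRounds edges ds (edges.foldl (pvEdgeStep d) (r, false)).1
      else (edges.foldl (pvEdgeStep d) (r, false)).1) := rfl

-- resolved targets of the frontier round and of the edge round coincide
theorem pvMemEquiv (n : Int) (edges : List (List Int)) (r f : List Int) (d : Int) (hd : 0 ≤ d)
    (hL : r.length = (n+1).toNat)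
    (hes : ∀ e ∈ edges, PySem.Raise.InRange r.length (pvE0 e) ∧ PySem.Raise.InRange r.length (pvE1 e))
    (hf : ∀ x ∈ f, PySem.List.pyGetD r x (-1) = d)
    (hcov : ∀ k, k < r.length → r.getD k 0 = d → ∃ x ∈ f, PySem.List.pyIdx? r.length x = some k) :
    ∀ k : Nat,
      (∃ x ∈ f.flatMap (fun u => PySem.List.pyGetD (pvInitAdj n edges) u []),
          PySem.List.pyIdx? r.length x = some k)
        ↔ (∃ x ∈ edges.flatMap (pvReqs d r), PySem.List.pyIdx? r.length x = some k) := by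
  have hes' : ∀ e ∈ edges, PySem.Raise.InRange (n+1).toNat (pvE0 e) ∧ PySem.Raise.InRange (n+1).toNat (pvE1 e) := by
    intro e he; rw [← hL]; exact hes e he
  intro k
  constructor
  · rintro ⟨x, hx, hxk⟩
    rw [List.mem_flatMap] at hx
    obtain ⟨u, hu, hxadj⟩ := hx
    have hur : PySem.Raise.InRange r.length u := pvInR_of_ge hd (hf u hu)
    have hur' : PySem.Raise.InRange (n+1).toNat u := by rw [← hL]; exact hur
    rw [pvAdjChar n edges hes' u x hur'] at hxadj
    obtain ⟨e, he, hcase⟩ := hxadj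
    rw [← hL] at hcase
    have hvalu : PySem.List.pyGetD r u 0 = d := by
      rw [pvEqIdx 0 (-1) hur hur rfl]
      exact hf u hu
    refine ⟨x, ?_, hxk⟩
    rw [List.mem_flatMap]
    refine ⟨e, he, ?_⟩
    unfold pvReqs
    rcases hcase with ⟨hidx, hxe⟩ | ⟨hidx, hxe⟩
    · have h0 : PySem.List.pyGetD r (pvE0 e) 0 = d := by
        rw [pvEqIdx 0 0 (hes e he).1 hur hidx]
        exact hvalu
      rw [if_pos h0, hxe]
      simp
    · have h0 : PySem.List.pyGetD r (pvE1 e) 0 = d := by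
        rw [pvEqIdx 0 0 (hes e he).2 hur hidx]
        exact hvalu
      rw [if_pos h0, hxe]
      simp
  · rintro ⟨x, hx, hxk⟩
    rw [List.mem_flatMap] at hx
    obtain ⟨e, he, hxreq⟩ := hx
    have ha := (hes e he).1
    have hb := (hes e he).2
    unfold pvReqs at hxreq
    rw [List.mem_append] at hxreq
    rcases hxreq with hx1 | hx0
    · by_cases hc : PySem.List.pyGetD r (pvE0 e) 0 = d
      · rw [if_pos hc, List.mem_singleton] at hx1
        have hlt := (pvIdx_spec ha).2
        have hval : r.getD (pvIdx r.length (pvE0 e)) 0 = d := by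
          rw [← pyGetD_r 0 ha]; exact hc
        obtain ⟨u, hu, huk⟩ := hcov _ hlt hval
        obtain ⟨hur, huidx⟩ := pvInR_of_idx huk
        refine ⟨x, ?_, hxk⟩
        rw [List.mem_flatMap]
        refine ⟨u, hu, ?_⟩
        rw [pvAdjChar n edges hes' u x (by rw [← hL]; exact hur)]
        refine ⟨e, he, Or.inl ⟨?_, hx1⟩⟩
        rw [← hL]
        rw [huidx]
      · rw [if_neg hc] at hx1
        simp at hx1
    · by_cases hc : PySem.List.pyGetD r (pvE1 e) 0 = d
      · rw [if_pos hc, List.mem_singleton] at hx0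
        have hlt := (pvIdx_spec hb).2
        have hval : r.getD (pvIdx r.length (pvE1 e)) 0 = d := by
          rw [← pyGetD_r 0 hb]; exact hc
        obtain ⟨u, hu, huk⟩ := hcov _ hlt hval
        obtain ⟨hur, huidx⟩ := pvInR_of_idx huk
        refine ⟨x, ?_, hxk⟩
        rw [List.mem_flatMap]
        refine ⟨u, hu, ?_⟩
        rw [pvAdjChar n edges hes' u x (by rw [← hL]; exact hur)]
        refine ⟨e, he, Or.inr ⟨?_, hx0⟩⟩
        rw [← hL]
        rw [huidx]
      · rw [if_neg hc] at hx0
        simp at hx0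

-- a round at a level no node carries leaves pvRounds at its start state
theorem pvRounds_stop (n : Int) (edges : List (List Int)) (r : List Int) (d : Int)
    (hd : 0 ≤ d)
    (hes : ∀ e ∈ edges, PySem.Raise.InRange (n+1).toNat (pvE0 e) ∧ PySem.Raise.InRange (n+1).toNat (pvE1 e))
    (hL : r.length = (n+1).toNat)
    (hnod : ∀ k, k < r.length → r.getD k 0 ≠ d) :
    pvRounds edges (PySem.List.pyRange d (n+1) 1) r = r := by
  by_cases hdn : n + 1 ≤ d
  · rw [PySem.List.pyRange_one_eq_nil hdn]
    rfl
  · rw [PySem.List.pyRange_one_cons (by omega), pvRounds_cons_eq]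
    have hes2 : ∀ e ∈ edges, PySem.Raise.InRange r.length (pvE0 e) ∧ PySem.Raise.InRange r.length (pvE1 e) := by
      intro e he; rw [hL]; exact hes e he
    rw [pvRound_noop hd edges r hes2 hnod]
    simp

-- MAIN INVARIANT, stage 2: the level-synchronous frontier loop computes the
-- same reach as B's edge-relaxation rounds, level by level
theorem pvMain2 (n : Int) (edges : List (List Int))
    (hes : ∀ e ∈ edges, PySem.Raise.InRange (n+1).toNat (pvE0 e) ∧ PySem.Raise.InRange (n+1).toNat (pvE1 e)) :
    ∀ (fuel : Nat) (r f : List Int) (d : Int),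
    r.length = (n+1).toNat → 0 ≤ d →
    (∀ x ∈ f, PySem.List.pyGetD r x (-1) = d) →
    (∀ k, k < r.length → r.getD k 0 = d → ∃ x ∈ f, PySem.List.pyIdx? r.length x = some k) →
    (∀ k, k < r.length → r.getD k 0 ≤ d) →
    (f ≠ [] → pvNeg r + 1 ≤ (n + 1 - d).toNat ∧ pvNeg r + 1 ≤ fuel) →
    pvLoopB fuel (pvInitAdj n edges) r f d = pvRounds edges (PySem.List.pyRange d (n+1) 1) r := by
  intro fuel
  induction fuel with
  | zero =>
    intro r f d hL hd hf hcov hle hbud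
    have hfnil : f = [] := by
      cases f with
      | nil => rfl
      | cons a fs => exact absurd (hbud (by simp)).2 (by omega)
    subst hfnil
    show r = _
    refine (pvRounds_stop n edges r d hd hes hL ?_).symm
    intro k hk hkd
    obtain ⟨x, hx, _⟩ := hcov k hk hkd
    simp at hx
  | succ fuel ih =>
    intro r f d hL hd hf hcov hle hbud
    cases f with
    | nil =>
      show r = _
      refine (pvRounds_stop n edges r d hd hes hL ?_).symm
      intro k hk hkd
      obtain ⟨x, hx, _⟩ := hcov k hk hkd
      simp at hx
    | cons u fs =>
      obtain ⟨hb1, hb2⟩ := hbud (by simp)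
      have hdn : d < n + 1 := by
        by_contra hdn
        have h0 : (n + 1 - d).toNat = 0 := by omega
        omega
      have hd1 : (0:Int) ≤ d + 1 := by omega
      rw [pvLoopB_cons]
      have hflat := pvFoldl_flatMap (pvG (d+1))
        (fun u => PySem.List.pyGetD (pvInitAdj n edges) u []) (u :: fs) (r, ([] : List Int))
      rw [← hflat]
      have hes2 : ∀ e ∈ edges, PySem.Raise.InRange r.length (pvE0 e) ∧ PySem.Raise.InRange r.length (pvE1 e) := by
        intro e he; rw [hL]; exact hes e he
      have hR := pvGfst (d+1) ((u :: fs).flatMap (fun u => PySem.List.pyGetD (pvInitAdj n edges) u [])) r []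
      have hmeq := pvMemEquiv n edges r (u :: fs) d hd hL hes2 hf hcov
      have hwe : pvWriteAll (d+1) ((u :: fs).flatMap (fun u => PySem.List.pyGetD (pvInitAdj n edges) u [])) r
          = pvWriteAll (d+1) (edges.flatMap (pvReqs d r)) r :=
        pvWriteAll_ext hd1 _ _ r hmeq
      have hedge := pvEfold hd r edges r false hes2 rfl (fun _ => Iff.rfl)
      rw [PySem.List.pyRange_one_cons (by omega), pvRounds_cons_eq, hedge]
      -- shared facts about the frontier round
      have hWlen : (pvWriteAll (d+1) ((u :: fs).flatMap (fun u => PySem.List.pyGetD (pvInitAdj n edges) u [])) r).length = (n+1).toNat := by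
        rw [pvWriteAll_length, hL]
      have hf' := pvG3 hd1 ((u :: fs).flatMap (fun u => PySem.List.pyGetD (pvInitAdj n edges) u []))
        (r, ([] : List Int)) (by intro y hy; simp at hy)
      rw [hR] at hf'
      by_cases hany : (edges.flatMap (pvReqs d r)).any (fun v => decide (PySem.List.pyGetD r v 0 < 0)) = true
      · rw [if_pos (by simp [hany])]
        have hproj : (pvWriteAll (d+1) (edges.flatMap (pvReqs d r)) r,
            false || (edges.flatMap (pvReqs d r)).any fun v => decide (PySem.List.pyGetD r v 0 < 0)).1
            = pvWriteAll (d+1) (edges.flatMap (pvReqs d r)) r := rfl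
        rw [hproj, ← hwe, hR]
        apply ih
        · exact hWlen
        · omega
        · exact hf'
        · -- coverage of level d+1 by the new frontier
          intro k hk hkval
          have hk' : k < r.length := by rw [pvWriteAll_length] at hk; exact hk
          have hchar := pvWriteAll_getD hd1 ((u :: fs).flatMap (fun u => PySem.List.pyGetD (pvInitAdj n edges) u [])) r k hk'
          rw [hchar] at hkval
          split_ifs at hkval with hcond
          · obtain ⟨x, hxF, hxk⟩ := (pvGsnd hd1 ((u :: fs).flatMap (fun u => PySem.List.pyGetD (pvInitAdj n edges) u [])) r [] k).mpr (Or.inr ⟨hcond.1, hcond.2⟩)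
            refine ⟨x, hxF, ?_⟩
            rw [pvWriteAll_length]
            exact hxk
          · exfalso
            have := hle k hk'
            omega
        · intro k hk
          have hk' : k < r.length := by rw [pvWriteAll_length] at hk; exact hk
          have hchar := pvWriteAll_getD hd1 ((u :: fs).flatMap (fun u => PySem.List.pyGetD (pvInitAdj n edges) u [])) r k hk'
          rw [hchar]
          split_ifs with hcond
          · omega
          · have := hle k hk'
            omega
        · -- fuel and round budget
          intro hFne
          have hcnt := pvG4 hd1 ((u :: fs).flatMap (fun u => PySem.List.pyGetD (pvInitAdj n edges) u []))
            (r, ([] : List Int))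
          rw [hR] at hcnt
          have hFlen : 1 ≤ ((((u :: fs).flatMap (fun u => PySem.List.pyGetD (pvInitAdj n edges) u [])).foldl (pvG (d+1)) (r, ([] : List Int))).2).length := by
            rcases hFF : (((u :: fs).flatMap (fun u => PySem.List.pyGetD (pvInitAdj n edges) u [])).foldl (pvG (d+1)) (r, ([] : List Int))).2 with _ | ⟨a, l⟩
            · exact absurd hFF hFne
            · simp
          simp only [List.length_nil, Nat.add_zero] at hcnt
          constructor
          · omega
          · omega
      · -- no write fired: the round reports no change and both loops stop
        have hanyf : (edges.flatMap (pvReqs d r)).any (fun v => decide (PySem.List.pyGetD r v 0 < 0)) = false :=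
          Bool.eq_false_iff.mpr hany
        rw [if_neg (by simp [hanyf])]
        have hproj : (pvWriteAll (d+1) (edges.flatMap (pvReqs d r)) r,
            false || (edges.flatMap (pvReqs d r)).any fun v => decide (PySem.List.pyGetD r v 0 < 0)).1
            = pvWriteAll (d+1) (edges.flatMap (pvReqs d r)) r := rfl
        rw [hproj, ← hwe, hR]
        have hFnil : (((u :: fs).flatMap (fun u => PySem.List.pyGetD (pvInitAdj n edges) u [])).foldl (pvG (d+1)) (r, ([] : List Int))).2 = [] := by
          rcases hFF : (((u :: fs).flatMap (fun u => PySem.List.pyGetD (pvInitAdj n edges) u [])).foldl (pvG (d+1)) (r, ([] : List Int))).2 with _ | ⟨a, l⟩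
          · rfl
          · exfalso
            have hxF : a ∈ (((u :: fs).flatMap (fun u => PySem.List.pyGetD (pvInitAdj n edges) u [])).foldl (pvG (d+1)) (r, ([] : List Int))).2 := by
              rw [hFF]; simp
            have hval := hf' a hxF
            have hInR : PySem.Raise.InRange (pvWriteAll (d+1) ((u :: fs).flatMap (fun u => PySem.List.pyGetD (pvInitAdj n edges) u [])) r).length a :=
              pvInR_of_ge hd1 hval
            have hInR' : PySem.Raise.InRange r.length a := by
              rw [pvWriteAll_length] at hInR; exact hInR
            obtain ⟨hsome, _⟩ := pvIdx_spec hInR'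
            have hex := (pvGsnd hd1 _ r [] (pvIdx r.length a)).mp ⟨a, hxF, hsome⟩
            rcases hex with ⟨x, hx, _⟩ | ⟨hneg, hexws⟩
            · simp at hx
            · obtain ⟨v, hvrq, hvk⟩ := (hmeq (pvIdx r.length a)).mp hexws
              obtain ⟨hvr, hvik⟩ := pvInR_of_idx hvk
              have hvneg : PySem.List.pyGetD r v 0 < 0 := by
                rw [pyGetD_r 0 hvr, hvik]
                exact hneg
              have : (edges.flatMap (pvReqs d r)).any (fun v => decide (PySem.List.pyGetD r v 0 < 0)) = true :=
                List.any_eq_true.mpr ⟨v, hvrq, by simpa using hvneg⟩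
              rw [this] at hanyf
              exact absurd hanyf (by simp)
        rw [hFnil]
        cases fuel <;> rfl

theorem pvBaseM1_getD (n : Int) (k : Nat) (hk : k < (n+1).toNat) :
    (((PySem.List.pyRange 0 (n+1) 1).map (fun _ => (-1 : Int)))).getD k 0 = -1 := by
  have hlen : (((PySem.List.pyRange 0 (n+1) 1).map (fun _ => (-1 : Int)))).length = (n+1).toNat := by
    rw [List.length_map, PySem.List.length_pyRange_one]; norm_num
  rw [List.getD_eq_getElem _ _ (by rw [hlen]; exact hk), List.getElem_map]

theorem pvKey2 (n : Int) (edges : List (List Int)) (s : Int) (hn : 1 ≤ n)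
    (hs1 : -(n+1) ≤ s) (hs2 : s ≤ n)
    (hes : ∀ e ∈ edges, PySem.Raise.InRange (n+1).toNat (pvE0 e) ∧ PySem.Raise.InRange (n+1).toNat (pvE1 e)) :
    pvLoopB (pvFuel n) (pvInitAdj n edges) (pvInitReach n s) [s] 0
      = pvRounds edges (PySem.List.pyRange 0 (n+1) 1) (pvInitReach n s) := by
  have hblen : ((PySem.List.pyRange 0 (n+1) 1).map (fun _ => (-1 : Int))).length = (n+1).toNat := by
    rw [List.length_map, PySem.List.length_pyRange_one]; norm_num
  have hsr : PySem.Raise.InRange ((PySem.List.pyRange 0 (n+1) 1).map (fun _ => (-1 : Int))).length s := by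
    rw [hblen]; constructor <;> omega
  have hslt := (pvIdx_spec hsr).2
  have hr0 : pvInitReach n s
      = ((PySem.List.pyRange 0 (n+1) 1).map (fun _ => (-1 : Int))).set
          (pvIdx ((PySem.List.pyRange 0 (n+1) 1).map (fun _ => (-1 : Int))).length s) 0 := by
    unfold pvInitReach
    rw [pySetD_r 0 hsr]
  have hgetD : ∀ k : Nat, k < (n+1).toNat → (pvInitReach n s).getD k 0
      = if pvIdx ((PySem.List.pyRange 0 (n+1) 1).map (fun _ => (-1 : Int))).length s = k then 0 else -1 := by
    intro k hk
    rw [hr0, pvGetD_set' _ _ (by rw [hblen]; exact hk)]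
    split_ifs with h
    · rfl
    · exact pvBaseM1_getD n k hk
  have hneg : pvNeg (pvInitReach n s) + 1 = (n+1).toNat := by
    have hcnt := pvCountP_set (fun x => decide (x < 0))
      ((PySem.List.pyRange 0 (n+1) 1).map (fun _ => (-1 : Int))) _ 0 hslt
    have hbneg := pvBaseM1_getD n _ (by rw [← hblen]; exact hslt)
    rw [hbneg] at hcnt
    have hbcount : ((PySem.List.pyRange 0 (n+1) 1).map (fun _ => (-1 : Int))).countP (fun x => decide (x < 0))
        = (n+1).toNat := by
      rw [List.countP_eq_length.mpr, hblen]
      intro x hx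
      rw [List.mem_map] at hx
      obtain ⟨_, _, rfl⟩ := hx
      simp
    rw [hbcount] at hcnt
    have e1 : (if ((fun x => decide (x < 0)) (-1 : Int) = true) then (1 : Nat) else 0) = 1 := by
      norm_num
    have e2 : (if ((fun x => decide (x < 0)) (0 : Int) = true) then (1 : Nat) else 0) = 0 := by
      norm_num
    rw [e1, e2] at hcnt
    unfold pvNeg
    rw [hr0]
    omega
  apply pvMain2 n edges hes (pvFuel n) (pvInitReach n s) [s] 0 (pvInitReach_len n s) le_rfl
  · intro x hx
    rw [List.mem_singleton] at hx
    subst hx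
    exact pvInitReach_start hn hs1 hs2
  · intro k hk hkd
    rw [pvInitReach_len] at hk
    rw [hgetD k hk] at hkd
    split_ifs at hkd with h
    all_goals try omega
    refine ⟨s, by simp, ?_⟩
    rw [pvInitReach_len, ← hblen, (pvIdx_spec hsr).1, h]
  · intro k hk
    rw [pvInitReach_len] at hk
    rw [hgetD k hk]
    split_ifs <;> omega
  · intro _
    have hfuel : pvFuel n = (2*(n+1)).toNat + 2 := rfl
    constructor
    · omega
    · omega

-- ===== VERDICT (by name: the statement is the Claim_ definition above) =====
theorem bfs_spec : Claim_equal_bfs := by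
  intro n m edges s _ hpre
  obtain ⟨hn, ⟨hs1, hs2⟩, hed⟩ := hpre
  have hes : ∀ e ∈ edges, PySem.Raise.InRange (n+1).toNat (pvE0 e) ∧ PySem.Raise.InRange (n+1).toNat (pvE1 e) := by
    intro e he
    obtain ⟨hlen2, hmem⟩ := hed e he
    rcases e with _ | ⟨a, t⟩
    · simp at hlen2
    rcases t with _ | ⟨b, t⟩
    · simp at hlen2
    have hva := hmem a (by simp)
    have hvb := hmem b (by simp [List.take])
    have hE0 : pvE0 (a :: b :: t) = a := by
      simp [pvE0, PySem.List.pyGetD, PySem.List.pyGet?, PySem.List.pyIdx?]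
      split_ifs with h
      · simp
      · exfalso; omega
    have hE1 : pvE1 (a :: b :: t) = b := by
      simp [pvE1, PySem.List.pyGetD, PySem.List.pyGet?, PySem.List.pyIdx?]
    constructor
    · rw [hE0]
      obtain ⟨hva1, hva2⟩ := hva
      constructor <;> omega
    · rw [hE1]
      obtain ⟨hvb1, hvb2⟩ := hvb
      constructor <;> omega
  unfold Spec_bfs bfs bfs_alt
  rw [pvKey (pvInitAdj n edges) hn hs1 hs2, pvKey2 n edges s hn hs1 hs2 hes]
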